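-- pv_equiv track=rewrite | github.com/ttzytt/PyAutoGrade | tests/Block 4/tested_code/1254/file_reading_review.py | count_long_lines
-- ===== SOURCE A (Python) =====
-- def count_long_lines(read_file, min_length):
--     count = 0
--     for line in read_file:
--         sum_of_characters = 0
--         words = line.split()
--         for word in words:
--             sum_of_characters += len(word)
--         if sum_of_characters >= min_length:
--             count += 1
--     return count
-- ===== SOURCE B (Python) =====
-- def count_long_lines(read_file, min_length):
--     return sum(1 for line in read_file
--                if sum(1 for c in line if not c.isspace()) >= min_length)
-- ===== Notes on version B (the rewrite author's own statement) =====
-- stated objective: simpler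
-- what changed: Replaces the accumulator loop with split() and a word-length summing inner loop by a single comprehension counting non-whitespace characters per line directly.
import Mathlib
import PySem

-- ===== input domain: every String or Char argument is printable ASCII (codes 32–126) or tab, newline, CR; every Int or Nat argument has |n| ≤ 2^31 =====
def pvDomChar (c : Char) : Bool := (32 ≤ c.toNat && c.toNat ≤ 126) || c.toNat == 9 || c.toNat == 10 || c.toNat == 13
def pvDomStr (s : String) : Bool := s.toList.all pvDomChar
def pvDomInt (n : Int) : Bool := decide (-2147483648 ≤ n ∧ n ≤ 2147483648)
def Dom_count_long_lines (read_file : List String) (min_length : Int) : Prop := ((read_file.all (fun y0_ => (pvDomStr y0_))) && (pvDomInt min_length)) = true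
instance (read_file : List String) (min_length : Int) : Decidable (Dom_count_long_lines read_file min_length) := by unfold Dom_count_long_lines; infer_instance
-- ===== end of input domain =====

-- B replaces A's split()-and-sum-word-lengths inner loop by a direct count of
-- non-whitespace characters per line (same cost; simpler, one comprehension).

-- ===== PORT A =====
def count_long_lines (read_file : List String) (min_length : Int) : Int :=
  read_file.foldl (fun count line =>
    let sum_of_characters : Int := 0
    let words := PySem.Str.split₀ line
    let sum_of_characters :=
      words.foldl (fun s word => s + (PySem.Str.len word : Int)) sum_of_characters
    if sum_of_characters ≥ min_length then count + 1 else count) 0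

-- ===== PORT B =====
def count_long_lines_alt (read_file : List String) (min_length : Int) : Int :=
  ((read_file.countP (fun line =>
      decide (((line.toList.countP (fun c => !PySem.Chars.isspace c)) : Int) ≥ min_length)) : Nat) : Int)

-- ===== PRECONDITION & SPEC =====
def Spec_count_long_lines (read_file : List String) (min_length : Int) (out : Int) : Prop := out = count_long_lines_alt read_file min_length
instance (read_file : List String) (min_length : Int) (out : Int) : Decidable (Spec_count_long_lines read_file min_length out) := by unfold Spec_count_long_lines; infer_instance

-- ===== CLAIM (what is proved, stated in full; the proofs are below) =====
def Claim_equal_count_long_lines : Prop := ∀ (read_file : List String) (min_length : Int), Dom_count_long_lines read_file min_length → Spec_count_long_lines read_file min_length (count_long_lines read_file min_length)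

-- ===== LEMMAS AND PROOFS =====
-- sum of word lengths produced by split₀.go equals the non-space char count
lemma go_sum (cs : List Char) : ∀ (cur : List Char) (acc : List (List Char)),
    ((PySem.Chars.split₀.go cs cur acc).map List.length).sum
      = cs.countP (fun c => !PySem.Chars.isspace c) + cur.length
        + ((acc.map List.length).sum) := by
  induction cs with
  | nil =>
    intro cur acc
    simp only [PySem.Chars.split₀.go]
    by_cases h : cur.isEmpty
    · simp_all [List.isEmpty_iff]
    · simp [h]; omega
  | cons c rest ih =>
    intro cur acc
    simp only [PySem.Chars.split₀.go]
    by_cases hs : PySem.Chars.isspace c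
    · by_cases h : cur.isEmpty
      · simp_all [List.isEmpty_iff]
      · simp [hs, h, ih]
        omega
    · simp [hs, ih]
      omega

lemma split₀_sum (cs : List Char) :
    ((PySem.Chars.split₀ cs).map List.length).sum
      = cs.countP (fun c => !PySem.Chars.isspace c) := by
  simpa using go_sum cs [] []

-- A's inner fold over the split words computes that same count, as an Int
lemma split_words_sum (line : String) :
    (PySem.Str.split₀ line).foldl (fun s word => s + (PySem.Str.len word : Int)) 0
      = ((line.toList.countP (fun c => !PySem.Chars.isspace c) : Nat) : Int) := by
  have h : ∀ (ws : List (List Char)) (a : Int),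
      (ws.map String.ofList).foldl (fun s word => s + (PySem.Str.len word : Int)) a
        = a + ((ws.map List.length).sum : Nat) := by
    intro ws
    induction ws with
    | nil => intro a; simp
    | cons w t ih =>
      intro a
      simp only [List.map_cons, List.foldl_cons, ih]
      simp [PySem.Str.len]
      ring
  simp only [PySem.Str.split₀]
  rw [h, split₀_sum]
  simp

-- A's counting fold equals countP of the per-line predicate
lemma foldl_count (p : String → Bool) : ∀ (rf : List String) (a : Int),
    rf.foldl (fun count line => if p line then count + 1 else count) a
      = a + ((rf.countP p : Nat) : Int) := by
  intro rf
  induction rf with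
  | nil => intro a; simp
  | cons l t ih =>
    intro a
    by_cases h : p l <;> simp [h, ih]; ring

-- ===== VERDICT (by name: the statement is the Claim_ definition above) =====
theorem count_long_lines_spec : Claim_equal_count_long_lines := by
  intro read_file min_length _
  unfold Spec_count_long_lines count_long_lines count_long_lines_alt
  have hstep : (fun (count : Int) (line : String) =>
      let sum_of_characters : Int := 0
      let words := PySem.Str.split₀ line
      let sum_of_characters :=
        words.foldl (fun s word => s + (PySem.Str.len word : Int)) sum_of_characters
      if sum_of_characters ≥ min_length then count + 1 else count)
      = (fun (count : Int) (line : String) =>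
        if (decide (((line.toList.countP (fun c => !PySem.Chars.isspace c)) : Int) ≥ min_length))
          then count + 1 else count) := by
    funext count line
    simp only [split_words_sum]
    by_cases h : ((line.toList.countP (fun c => !PySem.Chars.isspace c) : Nat) : Int) ≥ min_length <;>
      simp [h]
  rw [hstep, foldl_count]
  simp
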